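-- pv_equiv track=rewrite | github.com/prakruthis0803/TOC | app.py | get_rmd_steps
-- ===== SOURCE A (Python) =====
-- def get_rmd_steps(tree):
--     steps = []
--     expr = str(tree)
--     current = "start"
--     tokens = expr.split()
--     for i in range(len(tokens)-1, -1, -1):
--         current += f" ⟹ {' '.join(tokens[i:])}"
--         steps.append(current)
--     return steps
-- ===== SOURCE B (Python) =====
-- def get_rmd_steps(tree):
--     steps = []
--     current = "start"
--     suffix = None
--     for tok in reversed(str(tree).split()):
--         suffix = tok if suffix is None else tok + " " + suffix
--         current = current + " \u27f9 " + suffix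
--         steps.append(current)
--     return steps
-- ===== Notes on version B (the rewrite author's own statement) =====
-- stated objective: alternative
-- what changed: B replaces the index loop that re-joins the slice tokens[i:] with a space at every step by a single pass over reversed(tokens) that maintains the suffix string incrementally, extending the previous suffix instead of re-joining a slice.
import Mathlib
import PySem

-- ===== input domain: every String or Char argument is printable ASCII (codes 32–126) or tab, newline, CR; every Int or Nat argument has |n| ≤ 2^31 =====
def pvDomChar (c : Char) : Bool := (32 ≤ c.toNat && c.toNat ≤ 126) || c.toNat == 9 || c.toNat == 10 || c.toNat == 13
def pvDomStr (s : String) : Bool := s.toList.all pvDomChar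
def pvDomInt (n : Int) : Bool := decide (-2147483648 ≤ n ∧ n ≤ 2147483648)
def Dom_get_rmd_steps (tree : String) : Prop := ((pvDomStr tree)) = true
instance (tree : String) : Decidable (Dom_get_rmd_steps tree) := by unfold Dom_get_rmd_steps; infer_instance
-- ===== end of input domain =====

-- B replaces A's per-step ' '.join(tokens[i:]) re-join with one pass over reversed tokens
-- maintaining the suffix incrementally (alternative decomposition; return values proved equal).


-- ===== PORT A =====
def get_rmd_steps (tree : String) : List String :=
  let expr := tree                      -- str(tree) on a str is the identity
  let tokens := PySem.Str.split₀ expr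
  ((PySem.List.pyRange ((tokens.length : Int) - 1) (-1) (-1)).foldl
    (fun (st : List String × String) i =>
      let current := st.2 ++ " ⟹ " ++ PySem.Str.join " " (PySem.List.slice tokens (some i) none)
      (st.1 ++ [current], current))
    ([], "start")).1

-- ===== PORT B =====
-- loop body of B: state is (steps, current, suffix : Option String)
def bStep (st : List String × String × Option String) (tok : String) :
    List String × String × Option String :=
  let suffix : String :=
    match st.2.2 with
    | none => tok
    | some s => tok ++ " " ++ s
  let current := st.2.1 ++ " ⟹ " ++ suffix
  (st.1 ++ [current], current, some suffix)

def get_rmd_steps_alt (tree : String) : List String :=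
  ((PySem.Str.split₀ tree).reverse.foldl bStep ([], "start", none)).1

-- ===== PRECONDITION & SPEC =====
def Spec_get_rmd_steps (tree : String) (out : List String) : Prop := out = get_rmd_steps_alt tree
instance (tree : String) (out : List String) : Decidable (Spec_get_rmd_steps tree out) := by unfold Spec_get_rmd_steps; infer_instance

-- ===== CLAIM (what is proved, stated in full; the proofs are below) =====
def Claim_equal_get_rmd_steps : Prop := ∀ (tree : String), Dom_get_rmd_steps tree → Spec_get_rmd_steps tree (get_rmd_steps tree)

-- ===== LEMMAS AND PROOFS =====

-- A's loop body, with the joined suffix string abstracted out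
def aStep (st : List String × String) (s : String) : List String × String :=
  (st.1 ++ [st.2 ++ " ⟹ " ++ s], st.2 ++ " ⟹ " ++ s)

-- A's loop, rephrased over Nat indices k = 0,…,n-1 (i = n-1-k) with the slice as List.drop
def aFold (ts : List String) (init : List String × String) : List String × String :=
  (List.range ts.length).foldl
    (fun st k => aStep st (PySem.Str.join " " (ts.drop (ts.length - 1 - k)))) init

theorem join_space_cons_cons (a b : String) (l : List String) :
    PySem.Str.join " " (a :: b :: l) = a ++ " " ++ PySem.Str.join " " (b :: l) := by
  apply String.toList_inj.mp
  simp [PySem.Str.join, PySem.Chars.join_cons_cons]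

theorem join_space_singleton (a : String) : PySem.Str.join " " [a] = a := by
  apply String.toList_inj.mp
  simp [PySem.Str.join, PySem.Chars.join_singleton]

theorem bfold_eq (ts : List String) (steps : List String) (cur : String) :
    ts.reverse.foldl bStep (steps, cur, none) =
      ((aFold ts (steps, cur)).1, (aFold ts (steps, cur)).2,
        if ts = [] then none else some (PySem.Str.join " " ts)) := by
  induction ts with
  | nil => simp [aFold]
  | cons t ts' ih =>
    have hstep : (t :: ts').reverse.foldl bStep (steps, cur, none)
        = bStep (ts'.reverse.foldl bStep (steps, cur, none)) t := by
      simp [List.foldl_append]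
    rw [hstep, ih]
    have hpref : (List.range ts'.length).foldl
          (fun st k => aStep st (PySem.Str.join " "
            ((t :: ts').drop (ts'.length + 1 - 1 - k)))) (steps, cur)
        = aFold ts' (steps, cur) := by
      apply PySem.List.foldl_congr_mem
      intro acc k hk
      have hk' : k < ts'.length := List.mem_range.mp hk
      have hdrop : (t :: ts').drop (ts'.length + 1 - 1 - k)
          = ts'.drop (ts'.length - 1 - k) := by
        have h1 : ts'.length + 1 - 1 - k = (ts'.length - 1 - k) + 1 := by omega
        rw [h1, List.drop_succ_cons]
      rw [hdrop]
    have hAfold : aFold (t :: ts') (steps, cur)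
        = aStep (aFold ts' (steps, cur)) (PySem.Str.join " " (t :: ts')) := by
      unfold aFold
      rw [show (t :: ts').length = ts'.length + 1 from rfl, List.range_succ,
        List.foldl_append]
      simp only [List.foldl_cons, List.foldl_nil]
      rw [hpref]
      congr 2
      simp
    rw [hAfold]
    cases hts : ts' with
    | nil =>
      simp [bStep, aStep, aFold, join_space_singleton]
    | cons b l =>
      have hsuffix : PySem.Str.join " " (t :: b :: l)
          = t ++ " " ++ PySem.Str.join " " (b :: l) := join_space_cons_cons t b l
      simp [bStep, aStep, hsuffix]

theorem A_fold_eq (ts : List String) :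
    ((PySem.List.pyRange ((ts.length : Int) - 1) (-1) (-1)).foldl
      (fun (st : List String × String) i =>
        let current := st.2 ++ " ⟹ " ++ PySem.Str.join " " (PySem.List.slice ts (some i) none)
        (st.1 ++ [current], current))
      ([], "start")).1 = (aFold ts ([], "start")).1 := by
  unfold aFold
  rw [PySem.List.pyRange_neg_one]
  have hn : (((ts.length : Int) - 1) - (-1)).toNat = ts.length := by omega
  rw [hn, List.foldl_map]
  congr 1
  apply PySem.List.foldl_congr_mem
  intro acc k hk
  have hk' : k < ts.length := List.mem_range.mp hk
  have hnn : (0 : Int) ≤ (ts.length : Int) - 1 - (k : Int) := by omega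
  rw [PySem.List.slice_from _ hnn]
  have ht : (((ts.length : Int) - 1 - (k : Int))).toNat = ts.length - 1 - k := by omega
  rw [ht]
  rfl

-- ===== VERDICT (by name: the statement is the Claim_ definition above) =====
theorem get_rmd_steps_spec : Claim_equal_get_rmd_steps := by
  intro tree _
  show get_rmd_steps tree = get_rmd_steps_alt tree
  have hA : get_rmd_steps tree = (aFold (PySem.Str.split₀ tree) ([], "start")).1 :=
    A_fold_eq (PySem.Str.split₀ tree)
  rw [hA]
  unfold get_rmd_steps_alt
  rw [bfold_eq (PySem.Str.split₀ tree) [] "start"]
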